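-- pv_equiv track=rewrite | github.com/YounesBensafia/Pattern-searching-in-a-text | suffix_array.py | search_pattern_with_suffix_array
-- ===== SOURCE A (Python) =====
-- def suffix_array_construction(text):
--     n = len(text)
--     suffixes = [(text[i:], i) for i in range(n)]
--
--     # HENA F SORT THSB CHHAL TWL
--     suffixes.sort()
--
--     suffix_array = [suffix[1] for suffix in suffixes]
--     return suffix_array
--
-- def search_pattern_with_suffix_array(text, pattern):
--
--     # HENA F CONSTRUCTION THSB CHHAL TWL TANI
--     suffix_array = suffix_array_construction(text)
--
--     m = len(pattern)
--     indices = list()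
--     for index in suffix_array:
--         if text[index:index + m] == pattern:
--             indices.append(index)
--     return indices
-- ===== SOURCE B (Python) =====
-- def search_pattern_with_suffix_array(text, pattern):
--     # Collect matching positions by direct scan, then order them the way the
--     # suffix array would: by their suffix.  Only the matches get sorted.
--     m = len(pattern)
--     matches = [i for i in range(len(text)) if text[i:i + m] == pattern]
--     matches.sort(key=lambda i: text[i:])
--     return matches
-- ===== Notes on version B (the rewrite author's own statement) =====
-- stated objective: faster
-- what changed: B drops the suffix-array construction entirely: it scans the text once collecting the matching positions and then sorts only those matches by their suffix, instead of building and sorting all n suffixes and filtering them.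
import Mathlib
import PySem

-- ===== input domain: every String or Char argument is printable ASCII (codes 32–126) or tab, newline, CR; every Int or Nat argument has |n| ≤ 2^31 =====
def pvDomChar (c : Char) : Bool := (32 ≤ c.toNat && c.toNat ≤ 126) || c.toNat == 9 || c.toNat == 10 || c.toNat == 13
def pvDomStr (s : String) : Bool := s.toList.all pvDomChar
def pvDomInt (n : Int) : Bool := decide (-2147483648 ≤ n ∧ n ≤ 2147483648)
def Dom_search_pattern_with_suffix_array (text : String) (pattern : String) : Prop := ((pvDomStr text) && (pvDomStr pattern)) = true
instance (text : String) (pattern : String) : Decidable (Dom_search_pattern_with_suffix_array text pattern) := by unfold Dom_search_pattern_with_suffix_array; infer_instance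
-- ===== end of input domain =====

-- B replaces A's sort of all n suffixes by a direct scan for the matching
-- positions followed by a sort of the matches only (objective: faster).

-- ===== PORT A =====
def suffix_array_construction (text : String) : List Int :=
  let n : Int := PySem.Str.len text
  let suffixes : List (String × Int) :=
    (PySem.List.pyRange 0 n 1).map (fun i => (PySem.Str.slice text (some i) none, i))
  -- suffixes.sort() on (str, int) pairs: tuple order = lexicographic on the pair
  let sortedSuffixes := PySem.List.sorted2 suffixes (fun s => s.1) (fun s => s.2)
  sortedSuffixes.map (fun s => s.2)

def search_pattern_with_suffix_array (text : String) (pattern : String) : List Int :=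
  let suffix_array := suffix_array_construction text
  let m : Int := PySem.Str.len pattern
  suffix_array.foldl
    (fun indices index =>
      if PySem.Str.slice text (some index) (some (index + m)) == pattern then
        indices ++ [index]
      else indices) []

-- ===== PORT B =====
def search_pattern_with_suffix_array_alt (text : String) (pattern : String) : List Int :=
  let m : Int := PySem.Str.len pattern
  let hits : List Int :=
    (PySem.List.pyRange 0 (PySem.Str.len text) 1).filter
      (fun i => PySem.Str.slice text (some i) (some (i + m)) == pattern)
  PySem.List.sorted hits (fun i => PySem.Str.slice text (some i) none) false

-- ===== PRECONDITION & SPEC =====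
def Spec_search_pattern_with_suffix_array (text : String) (pattern : String) (out : List Int) : Prop := out = search_pattern_with_suffix_array_alt text pattern
instance (text : String) (pattern : String) (out : List Int) : Decidable (Spec_search_pattern_with_suffix_array text pattern out) := by unfold Spec_search_pattern_with_suffix_array; infer_instance

-- ===== CLAIM (what is proved, stated in full; the proofs are below) =====
def Claim_equal_search_pattern_with_suffix_array : Prop := ∀ (text : String) (pattern : String), Dom_search_pattern_with_suffix_array text pattern → Spec_search_pattern_with_suffix_array text pattern (search_pattern_with_suffix_array text pattern)

-- ===== LEMMAS AND PROOFS =====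

-- insertBy only looks at `before x y` for list elements y: congruence under agreement there
theorem insertBy_congr {α : Type} (f g : α → α → Bool) (x : α) (ys : List α)
    (h : ∀ y ∈ ys, f x y = g x y) :
    PySem.List.insertBy f x ys = PySem.List.insertBy g x ys := by
  induction ys with
  | nil => rfl
  | cons y ys ih =>
    simp only [PySem.List.insertBy]
    rw [h y (by simp)]
    by_cases hb : g x y = true
    · simp [hb]
    · simp only [Bool.not_eq_true] at hb
      simp [hb]
      exact ih (fun z hz => h z (by simp [hz]))

theorem foldl_insertBy_congr {α : Type} (f g : α → α → Bool) (P : α → Prop)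
    (hfg : ∀ a b, P a → P b → f a b = g a b) :
    ∀ (xs acc : List α), (∀ a ∈ xs, P a) → (∀ a ∈ acc, P a) →
      xs.foldl (fun acc x => PySem.List.insertBy f x acc) acc
        = xs.foldl (fun acc x => PySem.List.insertBy g x acc) acc := by
  intro xs
  induction xs with
  | nil => intro acc _ _; rfl
  | cons x xs ih =>
    intro acc hxs hacc
    simp only [List.foldl_cons]
    rw [insertBy_congr f g x acc
      (fun y hy => hfg x y (hxs x (by simp)) (hacc y hy))]
    exact ih _ (fun a ha => hxs a (by simp [ha]))
      (fun a ha => by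
        rcases (PySem.List.mem_insertBy g x a acc).mp ha with h | h
        · exact h ▸ hxs x (by simp)
        · exact hacc a h)

-- sorting pairs with distinct first components: the tuple tie-break never fires
theorem sorted2_eq_sorted_of_fst_inj {α κ₁ κ₂ : Type} [LinearOrder κ₁] [LinearOrder κ₂]
    (xs : List α) (k1 : α → κ₁) (k2 : α → κ₂)
    (h : ∀ a ∈ xs, ∀ b ∈ xs, k1 a = k1 b → a = b) :
    PySem.List.sorted2 xs k1 k2 false = PySem.List.sorted xs k1 false := by
  rw [PySem.List.sorted_eq_foldl_insertBy]
  show List.foldl _ [] xs = _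
  exact foldl_insertBy_congr _ _ (· ∈ xs)
    (fun a b ha hb => by
      by_cases hk : k1 a = k1 b
      · have hab : a = b := h a ha b hb hk
        subst hab
        simp
      · rcases lt_or_gt_of_ne hk with hlt | hgt
        · simp [hlt, not_lt_of_gt hlt]
        · simp [hgt, not_lt_of_gt hgt])
    xs [] (fun a ha => ha) (by simp)

theorem search_pattern_with_suffix_array_main (text pattern : String) :
    search_pattern_with_suffix_array text pattern
      = search_pattern_with_suffix_array_alt text pattern := by
  unfold search_pattern_with_suffix_array suffix_array_construction
    search_pattern_with_suffix_array_alt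
  dsimp only
  set n : Int := PySem.Str.len text with hn
  set m : Int := PySem.Str.len pattern with hm
  set key : Int → String := fun i => PySem.Str.slice text (some i) none with hkey
  set p : Int → Bool := fun i => PySem.Str.slice text (some i) (some (i + m)) == pattern with hp
  set suffixes : List (String × Int) :=
    (PySem.List.pyRange 0 n 1).map (fun i => (key i, i)) with hsuf
  -- key is injective on [0, n)
  have hkeyinj : ∀ i, 0 ≤ i → i < n → ∀ j, 0 ≤ j → j < n → key i = key j → i = j := by
    intro i hi0 hin j hj0 hjn hkij
    have hlen : n = (text.toList.length : Int) := by
      simp [hn, PySem.Str.len_eq]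
    have h1 : (key i).toList = text.toList.drop i.toNat := by
      simp [hkey, PySem.Str.toList_slice, PySem.Chars.slice_eq_listSlice,
        PySem.List.slice_from _ hi0]
    have h2 : (key j).toList = text.toList.drop j.toNat := by
      simp [hkey, PySem.Str.toList_slice, PySem.Chars.slice_eq_listSlice,
        PySem.List.slice_from _ hj0]
    have hdrop : text.toList.drop i.toNat = text.toList.drop j.toNat := by
      rw [← h1, ← h2, hkij]
    have hlen' : text.toList.length - i.toNat = text.toList.length - j.toNat := by
      simpa using congrArg List.length hdrop
    omega
  have hfstinj : ∀ a ∈ suffixes, ∀ b ∈ suffixes, a.1 = b.1 → a = b := by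
    intro a ha b hb hab
    rcases List.mem_map.mp ha with ⟨i, hi, rfl⟩
    rcases List.mem_map.mp hb with ⟨j, hj, rfl⟩
    rcases PySem.List.mem_pyRange_one.mp hi with ⟨hi0, hin⟩
    rcases PySem.List.mem_pyRange_one.mp hj with ⟨hj0, hjn⟩
    have : i = j := hkeyinj i hi0 hin j hj0 hjn hab
    simp [this]
  rw [sorted2_eq_sorted_of_fst_inj suffixes (fun s => s.1) (fun s => s.2) hfstinj]
  set S := PySem.List.sorted suffixes (fun s => s.1) false with hS
  -- A's loop is a filter over S.map snd
  rw [show (fun (indices : List Int) (index : Int) =>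
        if PySem.Str.slice text (some index) (some (index + m)) == pattern then
          indices ++ [index] else indices)
      = (fun indices index => if p index = true then indices ++ [(fun x => x) index] else indices)
      from by funext indices index; simp [hp]]
  rw [PySem.List.foldl_append_if p (fun x => x) (S.map (fun s => s.2)) []]
  simp only [List.nil_append, List.map_id_fun', id]
  -- B's sorted equals that filtered list
  refine (PySem.List.sorted_eq_of_perm_of_pairwise_lt _ _ key ?_ ?_).symm
  · -- permutation
    have h1 : S.Perm suffixes := PySem.List.sorted_perm suffixes _ false
    have h2 : (S.map (fun s => s.2)).Perm (PySem.List.pyRange 0 n 1) := by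
      have := h1.map (fun (s : String × Int) => s.2)
      simpa [hsuf, List.map_map, Function.comp_def] using this
    exact h2.filter p
  · -- strictly key-increasing
    have hnodup : suffixes.Nodup := by
      apply List.Nodup.map
      · intro i j hij
        simpa using congrArg Prod.snd hij
      · exact PySem.List.nodup_pyRange_one 0 n
    have hSnodup : S.Nodup := ((PySem.List.sorted_perm suffixes _ false).nodup_iff).mpr hnodup
    have hle : S.Pairwise (fun a b => a.1 ≤ b.1) := PySem.List.sorted_pairwise suffixes _
    have hcomb : S.Pairwise (fun a b => a.1 ≤ b.1 ∧ a ≠ b) := hle.and hSnodup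
    have hlt : S.Pairwise (fun a b => key a.2 < key b.2) := by
      refine hcomb.imp_of_mem ?_
      intro a b ha hb ⟨hab, hne⟩
      have ha' : a ∈ suffixes := (PySem.List.mem_sorted suffixes _ false a).mp ha
      have hb' : b ∈ suffixes := (PySem.List.mem_sorted suffixes _ false b).mp hb
      have hfa : a.1 = key a.2 := by
        rcases List.mem_map.mp ha' with ⟨i, _, rfl⟩; rfl
      have hfb : b.1 = key b.2 := by
        rcases List.mem_map.mp hb' with ⟨i, _, rfl⟩; rfl
      have hne1 : a.1 ≠ b.1 := fun h => hne (hfstinj a ha' b hb' h)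
      rw [← hfa, ← hfb]
      exact lt_of_le_of_ne hab hne1
    have : (S.map (fun s => s.2)).Pairwise (fun i j => key i < key j) :=
      List.pairwise_map.mpr hlt
    exact this.filter p

-- ===== VERDICT (by name: the statement is the Claim_ definition above) =====
theorem search_pattern_with_suffix_array_spec : Claim_equal_search_pattern_with_suffix_array := by
  intro text pattern _
  exact search_pattern_with_suffix_array_main text pattern
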